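-- pv_equiv track=rewrite | github.com/UITxWoodyNguyen/CTF | Dreamhack/1983/solve.py | get_spell
-- ===== SOURCE A (Python) =====
-- def get_spell(target):
--     spell = []
--     current = target
--     while current > 0:
--         if current % 2 == 1:
--             spell.append('A')
--             current -= 1
--         else:
--             spell.append('B')
--             current //= 2
--     return ''.join(reversed(spell))
-- ===== SOURCE B (Python) =====
-- def get_spell(target):
--     if target <= 0:
--         return ''
--     bits = bin(target)[2:]
--     out = ['A']
--     for b in bits[1:]:
--         out.append('B')
--         if b == '1':
--             out.append('A')
--     return ''.join(out)
-- ===== Notes on version B (the rewrite author's own statement) =====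
-- stated objective: alternative
-- what changed: B precomputes the binary representation of target and builds the spell in one forward MSB-to-LSB pass ('A' for the leading bit, then 'B' plus 'A' for each set bit), replacing A's reduce-target-to-zero loop that appends LSB-first and reverses at the end.
import Mathlib
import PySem

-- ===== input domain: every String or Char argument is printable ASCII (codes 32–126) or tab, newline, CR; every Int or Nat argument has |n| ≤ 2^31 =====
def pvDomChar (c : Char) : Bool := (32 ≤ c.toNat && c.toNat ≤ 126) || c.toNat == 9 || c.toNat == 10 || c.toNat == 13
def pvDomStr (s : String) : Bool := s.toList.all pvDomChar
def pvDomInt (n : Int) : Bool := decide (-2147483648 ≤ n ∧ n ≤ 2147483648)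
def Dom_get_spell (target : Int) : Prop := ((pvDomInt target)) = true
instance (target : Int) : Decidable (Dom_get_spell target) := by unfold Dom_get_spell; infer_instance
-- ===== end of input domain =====

-- B builds the spell in one forward pass over the binary digits of target, instead of A's reduce-and-reverse loop; same O(log n) cost, alternative decomposition.


-- ===== PORT A =====
-- the while loop of A: appends 'A'/'B' while reducing current to 0
def getSpellLoop (current : Int) (spell : List Char) : List Char :=
  if h : current > 0 then
    if current % 2 == 1 then
      getSpellLoop (current - 1) (spell ++ ['A'])
    else
      getSpellLoop (PySem.Int.floordiv current 2) (spell ++ ['B'])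
  else spell
termination_by current.toNat
decreasing_by
  · omega
  · have h2 : PySem.Int.floordiv current 2 = current / 2 := by
      simp [PySem.Int.floordiv, Int.fdiv_eq_ediv_of_nonneg current (by omega : (0:Int) ≤ (2:Int))]
    omega

def get_spell (target : Int) : String :=
  String.mk ((getSpellLoop target []).reverse)

-- ===== PORT B =====
-- bin(n)[2:] for n ≥ 1 (and '0' for 0): binary digits, MSB first
def natBits (n : Nat) : List Char :=
  if h : n < 2 then [if n == 1 then '1' else '0']
  else natBits (n / 2) ++ [if n % 2 == 1 then '1' else '0']
termination_by n
decreasing_by omega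

def get_spell_alt (target : Int) : String :=
  if target ≤ 0 then ""
  else
    let bits := natBits target.toNat
    let out := (bits.drop 1).foldl
      (fun acc b => (acc ++ ['B']) ++ (if b == '1' then ['A'] else [])) ['A']
    String.mk out

-- ===== PRECONDITION & SPEC =====
def Spec_get_spell (target : Int) (out : String) : Prop := out = get_spell_alt target
instance (target : Int) (out : String) : Decidable (Spec_get_spell target out) := by unfold Spec_get_spell; infer_instance

-- ===== CLAIM (what is proved, stated in full; the proofs are below) =====
def Claim_equal_get_spell : Prop := ∀ (target : Int), Dom_get_spell target → Spec_get_spell target (get_spell target)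

-- ===== LEMMAS AND PROOFS =====

def pvStep (b : Char) : List Char := if b == '1' then ['B', 'A'] else ['B']

-- B's character list for n ≥ 1
def pvChars (n : Nat) : List Char := 'A' :: ((natBits n).drop 1).flatMap pvStep

lemma natBits_ne_nil (n : Nat) : natBits n ≠ [] := by
  unfold natBits; split <;> simp

lemma pvChars_ge2 (n : Nat) (h : 2 ≤ n) :
    pvChars n = pvChars (n / 2) ++ pvStep (if n % 2 == 1 then '1' else '0') := by
  unfold pvChars
  rw [natBits]
  rw [dif_neg (by omega)]
  rw [List.drop_append_of_le_length (by
    have := natBits_ne_nil (n / 2)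
    cases hb : natBits (n / 2) with
    | nil => exact absurd hb this
    | cons a l => simp)]
  simp

lemma foldl_eq_pvChars (bits : List Char) (init : List Char) :
    bits.foldl (fun acc b => (acc ++ ['B']) ++ (if b == '1' then ['A'] else [])) init
      = init ++ bits.flatMap pvStep := by
  induction bits generalizing init with
  | nil => simp
  | cons b bs ih =>
    simp only [List.foldl_cons, List.flatMap_cons, ih, pvStep]
    cases hb : b == '1' <;> simp

lemma pvChars_one : pvChars 1 = ['A'] := by
  unfold pvChars
  rw [natBits]
  simp

lemma floordiv_nat_two (m : Nat) : PySem.Int.floordiv ((m : Nat) : Int) 2 = ((m / 2 : Nat) : Int) := by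
  simp [PySem.Int.floordiv, Int.fdiv_eq_ediv_of_nonneg (m : Int) (by omega : (0:Int) ≤ (2:Int))]

-- main invariant: A's loop output, reversed, is B's character list
lemma loop_char (n : Nat) (hn : 1 ≤ n) : ∀ spell : List Char,
    getSpellLoop (n : Int) spell = spell ++ (pvChars n).reverse := by
  induction n using Nat.strong_induction_on with
  | _ n ih =>
    intro spell
    rcases Nat.lt_or_ge n 2 with h2 | h2
    · -- n = 1
      have hn1 : n = 1 := by omega
      subst hn1
      rw [getSpellLoop]
      rw [dif_pos (by norm_num)]
      norm_num
      rw [getSpellLoop]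
      norm_num [pvChars_one]
    · rcases Nat.even_or_odd n with he | ho
      · -- even case: one step to n/2
        have hm : n % 2 = 0 := Nat.even_iff.mp he
        have hmod : ((n : Int) % 2 == 1) = false := by
          simp only [beq_eq_false_iff_ne, ne_eq]
          omega
        rw [getSpellLoop, dif_pos (by exact_mod_cast Nat.lt_of_lt_of_le Nat.zero_lt_one hn), hmod]
        simp only [Bool.false_eq_true, if_false]
        rw [floordiv_nat_two n, ih (n / 2) (by omega) (by omega)]
        rw [pvChars_ge2 n h2, (by simp [hm] : (n % 2 == 1) = false)]
        simp [pvStep]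
      · -- odd case: two steps, via n - 1 (even) then n / 2
        have hm : n % 2 = 1 := Nat.odd_iff.mp ho
        have hmod : ((n : Int) % 2 == 1) = true := by
          simp only [beq_iff_eq]
          omega
        rw [getSpellLoop, dif_pos (by exact_mod_cast Nat.lt_of_lt_of_le Nat.zero_lt_one hn), hmod]
        simp only [if_true]
        have hcast : (n : Int) - 1 = ((n - 1 : Nat) : Int) := by omega
        rw [hcast]
        have hmod2 : (((n - 1 : Nat) : Int) % 2 == 1) = false := by
          simp only [beq_eq_false_iff_ne, ne_eq]
          omega
        rw [getSpellLoop, dif_pos (by exact_mod_cast (show 0 < n - 1 by omega)), hmod2]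
        simp only [Bool.false_eq_true, if_false]
        rw [floordiv_nat_two (n - 1), ih ((n - 1) / 2) (by omega) (by omega)]
        have hhalf : (n - 1) / 2 = n / 2 := by omega
        rw [hhalf, pvChars_ge2 n h2, (by simp [hm] : (n % 2 == 1) = true)]
        simp [pvStep]

-- ===== VERDICT (by name: the statement is the Claim_ definition above) =====
theorem get_spell_spec : Claim_equal_get_spell := by
  intro target _
  unfold Spec_get_spell get_spell get_spell_alt
  by_cases h : target ≤ 0
  · rw [if_pos h, getSpellLoop, dif_neg (by omega)]
    rfl
  · rw [if_neg h]
    have hcast : target = ((target.toNat : Nat) : Int) := by omega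
    rw [hcast, loop_char target.toNat (by omega) []]
    simp only [Int.toNat_natCast, List.nil_append, List.reverse_reverse, foldl_eq_pvChars]
    rfl
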